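-- pv_equiv track=rewrite | github.com/YunjieWang1993/OpinionEvolutionCIKM2019 | 代码/PR.py | wordset
-- ===== SOURCE A (Python) =====
-- def wordset(cluster_centers_indices,lables,wordlists):#得到聚类之后的结果
--     num = len(cluster_centers_indices)
--     wordsetsindexs = []
--     for i in range(0,num):
--         wordlist = []
--         for j in range(0,len(lables)):
--             if lables[j] == i:
--                 wordlist.append(j)
--         wordsetsindexs.append(wordlist)
--     wordsets = []
--     for wordsetindex in wordsetsindexs:
--         wordlist = []
--         for i in wordsetindex:
--             word = wordlists[i]
--             wordlist.append(word)
--         wordsets.append(wordlist)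
--     return wordsets
-- ===== SOURCE B (Python) =====
-- def wordset(cluster_centers_indices, lables, wordlists):
--     num = len(cluster_centers_indices)
--     buckets = [[] for _ in range(num)]
--     for lab, word in zip(lables, wordlists):
--         if 0 <= lab < num:
--             buckets[lab].append(word)
--     return buckets
-- ===== Notes on version B (the rewrite author's own statement) =====
-- stated objective: faster
-- what changed: Replaces the per-cluster scan of all labels (and the second index-resolving pass) by a single pass over zip(lables, wordlists) that appends each word directly into its cluster's preallocated bucket.
import Mathlib
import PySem

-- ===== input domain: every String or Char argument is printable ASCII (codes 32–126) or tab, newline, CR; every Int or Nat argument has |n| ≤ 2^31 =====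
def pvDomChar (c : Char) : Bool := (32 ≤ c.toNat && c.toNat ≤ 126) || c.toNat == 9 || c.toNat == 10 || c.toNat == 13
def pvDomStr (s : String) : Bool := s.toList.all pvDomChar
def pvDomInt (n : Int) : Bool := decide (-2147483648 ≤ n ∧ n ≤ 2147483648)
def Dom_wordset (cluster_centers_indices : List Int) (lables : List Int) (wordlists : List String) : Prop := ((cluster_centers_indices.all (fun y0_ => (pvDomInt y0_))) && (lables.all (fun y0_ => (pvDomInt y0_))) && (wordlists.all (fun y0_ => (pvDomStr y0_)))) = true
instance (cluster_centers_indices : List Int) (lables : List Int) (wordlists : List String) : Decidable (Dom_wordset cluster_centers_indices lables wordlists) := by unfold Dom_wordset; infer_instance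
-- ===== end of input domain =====

-- B groups words by cluster label in one bucketing pass over zip(lables, wordlists)
-- instead of A's per-cluster rescan of all labels plus a second index-resolving pass.
-- Return-value equivalence on Pre_ (where A returns normally); outside Pre_ A raises IndexError.

-- ===== PORT A =====
-- literal transliteration of A: two nested passes building index lists, then a resolving pass.
-- wordlists[i] is ported as pyGetD (Python raises IndexError exactly outside Pre_wordset,
-- where the default is never used); lables[j] has j ∈ range(len(lables)), always in bounds.
def wordset (cluster_centers_indices : List Int) (lables : List Int) (wordlists : List String) : List (List String) :=
  let num : Int := cluster_centers_indices.length
  let wordsetsindexs : List (List Int) :=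
    (PySem.List.pyRange 0 num).foldl (fun acc i =>
      acc ++ [(PySem.List.pyRange 0 (lables.length : Int)).foldl
        (fun wordlist j => if PySem.List.pyGetD lables j 0 = i then wordlist ++ [j] else wordlist) []]) []
  wordsetsindexs.foldl (fun wordsets wordsetindex =>
    wordsets ++ [wordsetindex.foldl (fun wordlist i => wordlist ++ [PySem.List.pyGetD wordlists i ""]) []]) []

-- ===== PORT B =====
-- literal transliteration of B: preallocated buckets, one pass over zip(lables, wordlists).
def wordset_alt (cluster_centers_indices : List Int) (lables : List Int) (wordlists : List String) : List (List String) :=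
  let num : Nat := cluster_centers_indices.length
  let buckets : List (List String) := List.replicate num []
  (lables.zip wordlists).foldl (fun bs p =>
    if 0 ≤ p.1 ∧ p.1 < (num : Int) then
      bs.set p.1.toNat (bs.getD p.1.toNat [] ++ [p.2])
    else bs) buckets

-- ===== PRECONDITION & SPEC =====
-- Pre_ excludes exactly the inputs where A raises IndexError: an index j carrying an
-- in-range cluster label but no corresponding entry in wordlists.
def Pre_wordset (cluster_centers_indices : List Int) (lables : List Int) (wordlists : List String) : Prop :=
  ∀ j : Nat, j < lables.length →
    (0 ≤ lables.getD j 0 ∧ lables.getD j 0 < (cluster_centers_indices.length : Int)) →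
    j < wordlists.length
instance (cluster_centers_indices : List Int) (lables : List Int) (wordlists : List String) : Decidable (Pre_wordset cluster_centers_indices lables wordlists) := by unfold Pre_wordset; infer_instance
def pvWitness_wordset : List Int × List Int × List String := ([0, 1], [1, 0, 5, -1], ["a", "b", "c"])

def Spec_wordset (cluster_centers_indices : List Int) (lables : List Int) (wordlists : List String) (out : List (List String)) : Prop := out = wordset_alt cluster_centers_indices lables wordlists
instance (cluster_centers_indices : List Int) (lables : List Int) (wordlists : List String) (out : List (List String)) : Decidable (Spec_wordset cluster_centers_indices lables wordlists out) := by unfold Spec_wordset; infer_instance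

-- ===== CLAIM (what is proved, stated in full; the proofs are below) =====
def Claim_equal_wordset : Prop := ∀ (cluster_centers_indices : List Int) (lables : List Int) (wordlists : List String), Dom_wordset cluster_centers_indices lables wordlists → Pre_wordset cluster_centers_indices lables wordlists → Spec_wordset cluster_centers_indices lables wordlists (wordset cluster_centers_indices lables wordlists)
-- ===== LEMMAS AND PROOFS =====

-- the words of cluster i, read off zip(lables, wordlists): common normal form of both ports
def pvFM (pairs : List (Int × String)) (i : Int) : List String :=
  pairs.filterMap (fun p => if p.1 = i then some p.2 else none)

-- Prop-conditioned variant of PySem.List.foldl_append_if (that lemma's `if` is on a Bool)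
theorem pv_foldl_append_ite {α β : Type} (p : α → Prop) [DecidablePred p] (f : α → β) :
    ∀ (l : List α) (acc : List β),
      l.foldl (fun acc x => if p x then acc ++ [f x] else acc) acc
        = acc ++ (l.filter (fun x => decide (p x))).map f := by
  intro l
  induction l with
  | nil => intro acc; simp
  | cons x xs ih =>
    intro acc
    by_cases hx : p x <;> simp [List.foldl_cons, ih, hx]

theorem pv_filter_map_eq_filterMap {α β : Type} (p : α → Bool) (g : α → β) :
    ∀ l : List α, (l.filter p).map g = l.filterMap (fun x => if p x then some (g x) else none) := by
  intro l
  induction l with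
  | nil => simp
  | cons x xs ih =>
    by_cases hx : p x <;> simp [hx, ih]

-- zip as an indexed map over the shorter length
theorem pv_zip_eq_map_range {α β : Type} [Inhabited α] [Inhabited β] (xs : List α) (ys : List β) :
    xs.zip ys = (List.range (min xs.length ys.length)).map (fun j => (xs.getD j default, ys.getD j default)) := by
  apply List.ext_getElem
  · simp
  · intro n h1 h2
    simp only [List.length_zip] at h1
    simp [List.getElem_zip, Nat.lt_min.mp h1]

-- B's bucketing fold, characterised pointwise
theorem pv_fold_B (num : Nat) :
    ∀ (pairs : List (Int × String)) (bs : List (List String)), bs.length = num →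
      pairs.foldl (fun bs p =>
          if 0 ≤ p.1 ∧ p.1 < (num : Int) then
            bs.set p.1.toNat (bs.getD p.1.toNat [] ++ [p.2])
          else bs) bs
        = (List.range num).map (fun i : Nat => bs.getD i [] ++ pvFM pairs (i : Int)) := by
  intro pairs
  induction pairs with
  | nil =>
    intro bs hbs
    subst hbs
    simp only [List.foldl_nil, pvFM, List.filterMap_nil, List.append_nil]
    apply List.ext_getElem
    · simp
    · intro n h1 h2
      simp [List.getElem?_eq_getElem h1]
  | cons p ps ih =>
    intro bs hbs
    by_cases hp : 0 ≤ p.1 ∧ p.1 < (num : Int)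
    · have hlt : p.1.toNat < bs.length := by omega
      rw [List.foldl_cons, if_pos hp, ih _ (by simp [hbs])]
      apply List.map_congr_left
      intro i hi
      have hi' : i < num := List.mem_range.mp hi
      have hib : i < bs.length := by omega
      by_cases hidx : p.1 = (i : Int)
      · have ht : p.1.toNat = i := by omega
        have hset : (bs.set p.1.toNat (bs.getD p.1.toNat [] ++ [p.2])).getD i []
            = bs.getD i [] ++ [p.2] := by
          subst ht
          rw [List.getD_eq_getElem _ _ (by simpa using hlt), List.getElem_set_self]
        rw [hset]
        have hfm : pvFM (p :: ps) (i : Int) = p.2 :: pvFM ps (i : Int) := by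
          rw [pvFM, pvFM, List.filterMap_cons, if_pos hidx]
        rw [hfm, List.append_assoc, List.singleton_append]
      · have ht : p.1.toNat ≠ i := by omega
        rw [List.getD_eq_getElem _ _ (by simp [hib]), List.getD_eq_getElem _ _ hib]
        simp [List.getElem_set_ne (by omega), pvFM, hidx]
    · rw [List.foldl_cons, if_neg hp, ih _ hbs]
      apply List.map_congr_left
      intro i hi
      have hi' : i < num := List.mem_range.mp hi
      have hidx : p.1 ≠ (i : Int) := by
        intro h; exact hp ⟨by omega, by omega⟩
      simp [pvFM, hidx]

-- B equals the common normal form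
theorem pv_B_eq (cluster_centers_indices : List Int) (lables : List Int) (wordlists : List String) :
    wordset_alt cluster_centers_indices lables wordlists
      = (List.range cluster_centers_indices.length).map
          (fun i : Nat => pvFM (lables.zip wordlists) (i : Int)) := by
  unfold wordset_alt
  rw [pv_fold_B _ _ _ (List.length_replicate)]
  apply List.map_congr_left
  intro i hi
  simp [List.mem_range.mp hi]

-- A's per-cluster scan over range(len(lables)), restricted to indices the zip sees (uses Pre_)
theorem pv_A_entry (cluster_centers_indices : List Int) (lables : List Int) (wordlists : List String)
    (hPre : Pre_wordset cluster_centers_indices lables wordlists)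
    (k : Nat) (hk : k < cluster_centers_indices.length) :
    ((List.range lables.length).filter (fun j => decide (lables.getD j 0 = (k : Int)))).map
        (fun j => wordlists.getD j "")
      = pvFM (lables.zip wordlists) (k : Int) := by
  set M := min lables.length wordlists.length with hM
  have hMle : M ≤ lables.length := Nat.min_le_left _ _
  -- indices ≥ M never pass the filter (Pre_ forces matching indices below wordlists.length)
  have hrange : (List.range lables.length).filter (fun j => decide (lables.getD j 0 = (k : Int)))
      = (List.range M).filter (fun j => decide (lables.getD j 0 = (k : Int))) := by
    have hsplit : lables.length = M + (lables.length - M) := by omega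
    rw [hsplit, List.range_add, List.filter_append]
    have : ((List.range (lables.length - M)).map (fun x => M + x)).filter
        (fun j => decide (lables.getD j 0 = (k : Int))) = [] := by
      rw [List.filter_eq_nil_iff]
      intro j hj
      simp only [List.mem_map, List.mem_range] at hj
      obtain ⟨x, hx, rfl⟩ := hj
      simp only [decide_eq_true_eq]
      intro heq
      have hjl : M + x < lables.length := by omega
      have := hPre (M + x) hjl (by rw [heq]; exact ⟨Int.natCast_nonneg k, by exact_mod_cast hk⟩)
      omega
    rw [this, List.append_nil]
  rw [hrange, pv_filter_map_eq_filterMap]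
  rw [pvFM, pv_zip_eq_map_range, List.filterMap_map]
  apply List.filterMap_congr
  intro j hj
  have hjM : j < M := List.mem_range.mp hj
  simp

-- A equals the common normal form (uses Pre_)
theorem pv_A_eq (cluster_centers_indices : List Int) (lables : List Int) (wordlists : List String)
    (hPre : Pre_wordset cluster_centers_indices lables wordlists) :
    wordset cluster_centers_indices lables wordlists
      = (List.range cluster_centers_indices.length).map
          (fun i : Nat => pvFM (lables.zip wordlists) (i : Int)) := by
  unfold wordset
  simp only [PySem.List.pyRange_zero_natCast]
  simp only [pv_foldl_append_ite (fun j => PySem.List.pyGetD lables j 0 = _) (fun j => j),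
    List.nil_append]
  rw [PySem.List.foldl_append_singleton_eq_map, PySem.List.foldl_append_singleton_eq_map]
  simp only [List.nil_append, List.map_map]
  apply List.map_congr_left
  intro k hk
  have hk' : k < cluster_centers_indices.length := List.mem_range.mp hk
  simp only [Function.comp]
  rw [PySem.List.foldl_append_singleton_eq_map, List.nil_append]
  rw [List.filter_map, List.map_map]
  trans ((List.range lables.length).filter (fun j => decide (lables.getD j 0 = (k : Int)))).map
      (fun j => wordlists.getD j "")
  · have hf : ∀ j ∈ List.range lables.length,
        ((fun j : Int => decide (PySem.List.pyGetD lables j 0 = (k : Int))) ∘ (fun n : Nat => (n : Int))) j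
          = (fun j : Nat => decide (lables.getD j 0 = (k : Int))) j := by
      intro j _; simp [Function.comp, PySem.List.pyGetD_natCast]
    rw [List.filter_congr hf, List.map_map]
    apply List.map_congr_left
    intro j _
    simp [Function.comp, PySem.List.pyGetD_natCast]
  · exact pv_A_entry _ _ _ hPre k hk'

-- ===== VERDICT (by name: the statement is the Claim_ definition above) =====
theorem wordset_spec : Claim_equal_wordset := by
  intro cluster_centers_indices lables wordlists _ hPre
  unfold Spec_wordset
  rw [pv_A_eq _ _ _ hPre, pv_B_eq]
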